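-- pv_equiv track=rewrite | github.com/alephsyzygy/COLOSSUS | data/analysis.py | max_fluidbox
-- ===== SOURCE A (Python) =====
-- def max_fluidbox(data):
--     max_input = 0
--     max_output = 0
--     if "fluidbox_prototypes" in data:
--         for fluidbox in data["fluidbox_prototypes"]:
--             if fluidbox["production_type"] == "input":
--                 max_input += 1
--             elif fluidbox["production_type"] == "output":
--                 max_output += 1
--             else:
--                 max_input += 1
--                 max_output += 1
--     return max_input, max_output
-- ===== SOURCE B (Python) =====
-- def max_fluidbox(data):
--     if "fluidbox_prototypes" not in data:
--         return 0, 0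
--     protos = list(data["fluidbox_prototypes"])
--     total = len(protos)
--     c_in = sum(1 for f in protos if f["production_type"] == "input")
--     c_out = sum(1 for f in protos if f["production_type"] == "output")
--     return total - c_out, total - c_in
-- ===== Notes on version B (the rewrite author's own statement) =====
-- stated objective: alternative
-- what changed: Replaces the per-element three-branch accumulator with aggregate counting: total length plus counts of 'input'/'output' values, returning (total - c_out, total - c_in) by arithmetic.
import Mathlib
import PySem

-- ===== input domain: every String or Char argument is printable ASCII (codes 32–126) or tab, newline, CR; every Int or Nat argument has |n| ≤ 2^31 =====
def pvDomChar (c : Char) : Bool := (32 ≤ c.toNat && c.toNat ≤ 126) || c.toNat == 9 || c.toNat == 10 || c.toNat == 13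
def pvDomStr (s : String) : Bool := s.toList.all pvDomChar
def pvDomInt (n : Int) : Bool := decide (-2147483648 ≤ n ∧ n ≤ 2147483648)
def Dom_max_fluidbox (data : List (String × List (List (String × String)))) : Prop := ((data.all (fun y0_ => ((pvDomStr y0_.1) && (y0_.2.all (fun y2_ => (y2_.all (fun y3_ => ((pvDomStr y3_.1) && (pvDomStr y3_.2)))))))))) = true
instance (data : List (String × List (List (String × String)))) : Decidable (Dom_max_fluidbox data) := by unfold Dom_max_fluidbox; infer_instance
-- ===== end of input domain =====

-- B replaces A's per-element three-branch accumulator with aggregate counting plus arithmetic (objective: alternative, same cost).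
-- Dicts arrive as association lists; lookups go through PySem.Dict (last value wins on duplicate keys, like Python's dict).

-- ===== PORT A =====
-- the loop body of A: the three-branch if/elif/else on fluidbox["production_type"]
def pvStepA (acc : Int × Int) (f : List (String × String)) : Int × Int :=
  if (PySem.Dict.ofList f).getD "production_type" "" = "input" then (acc.1 + 1, acc.2)
  else if (PySem.Dict.ofList f).getD "production_type" "" = "output" then (acc.1, acc.2 + 1)
  else (acc.1 + 1, acc.2 + 1)

def max_fluidbox (data : List (String × List (List (String × String)))) : Int × Int :=
  match (PySem.Dict.ofList data).get? "fluidbox_prototypes" with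
  | none => (0, 0)
  | some protos => protos.foldl pvStepA (0, 0)

-- ===== PORT B =====
def max_fluidbox_alt (data : List (String × List (List (String × String)))) : Int × Int :=
  match (PySem.Dict.ofList data).get? "fluidbox_prototypes" with
  | none => (0, 0)
  | some protos =>
    let total : Int := protos.length
    let cIn : Int := (protos.filter (fun f => (PySem.Dict.ofList f).getD "production_type" "" == "input")).length
    let cOut : Int := (protos.filter (fun f => (PySem.Dict.ofList f).getD "production_type" "" == "output")).length
    (total - cOut, total - cIn)

-- ===== PRECONDITION & SPEC =====
-- Pre_ excludes inputs on which Python A raises KeyError: some fluidbox lacking the "production_type" key.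
def Pre_max_fluidbox (data : List (String × List (List (String × String)))) : Prop :=
  (((PySem.Dict.ofList data).get? "fluidbox_prototypes").getD []).all
    (fun f => (PySem.Dict.ofList f).contains "production_type") = true
instance (data : List (String × List (List (String × String)))) : Decidable (Pre_max_fluidbox data) := by unfold Pre_max_fluidbox; infer_instance
def pvWitness_max_fluidbox : (List (String × List (List (String × String)))) :=
  [("fluidbox_prototypes", [[("production_type", "input")], [("production_type", "none")]])]
def Spec_max_fluidbox (data : List (String × List (List (String × String)))) (out : Int × Int) : Prop := out = max_fluidbox_alt data
instance (data : List (String × List (List (String × String)))) (out : Int × Int) : Decidable (Spec_max_fluidbox data out) := by unfold Spec_max_fluidbox; infer_instance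

-- ===== CLAIM (what is proved, stated in full; the proofs are below) =====
def Claim_equal_max_fluidbox : Prop := ∀ (data : List (String × List (List (String × String)))), Dom_max_fluidbox data → Pre_max_fluidbox data → Spec_max_fluidbox data (max_fluidbox data)

-- ===== LEMMAS AND PROOFS =====

-- A's fold from an arbitrary accumulator equals the aggregate-count expression B computes.
lemma foldl_stepA (protos : List (List (String × String))) : ∀ (a b : Int),
    protos.foldl pvStepA (a, b)
      = (a + protos.length - (protos.filter (fun f => (PySem.Dict.ofList f).getD "production_type" "" == "output")).length,
         b + protos.length - (protos.filter (fun f => (PySem.Dict.ofList f).getD "production_type" "" == "input")).length) := by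
  induction protos with
  | nil => intro a b; simp
  | cons f rest ih =>
    intro a b
    simp only [List.foldl_cons, pvStepA, List.filter_cons]
    by_cases h1 : (PySem.Dict.ofList f).getD "production_type" "" = "input"
    · simp [h1, ih]; omega
    · by_cases h2 : (PySem.Dict.ofList f).getD "production_type" "" = "output"
      · simp [h2, ih]; omega
      · simp [h1, h2, ih]; constructor <;> omega

-- ===== VERDICT (by name: the statement is the Claim_ definition above) =====
theorem max_fluidbox_spec : Claim_equal_max_fluidbox := by
  intro data _ _
  unfold Spec_max_fluidbox max_fluidbox max_fluidbox_alt
  cases h : (PySem.Dict.ofList data).get? "fluidbox_prototypes" with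
  | none => rfl
  | some protos =>
    simp [foldl_stepA]
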